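-- pv_equiv track=rewrite | github.com/TobiahRex/algorist | flashcards/13-Apr-2025.py | dfs_main
-- ===== SOURCE A (Python) =====
-- def dfs_main(g):
--     visited = set()
--
--     def dfs(u):
--         for v in g.get(u):
--             if v not in visited:
--                 visited.add(v)
--                 dfs(v)
--
--     for v in g:
--         if v not in visited:
--             dfs(v)
--     return visited
-- ===== SOURCE B (Python) =====
-- def dfs_main(g):
--     visited = set()
--     for s in g:
--         if s not in visited:
--             stack = [list(g.get(s))]
--             while stack:
--                 rest = stack.pop()
--                 if rest:
--                     v = rest[0]
--                     stack.append(rest[1:])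
--                     if v not in visited:
--                         visited.add(v)
--                         stack.append(list(g.get(v)))
--     return visited
-- ===== Notes on version B (the rewrite author's own statement) =====
-- stated objective: alternative
-- what changed: The recursive nested-function DFS is replaced by an iterative traversal driven by an explicit stack of not-yet-processed adjacency suffixes (push g.get(v) on first visit, pop/advance otherwise); no recursion or inner function remains.
import Mathlib
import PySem

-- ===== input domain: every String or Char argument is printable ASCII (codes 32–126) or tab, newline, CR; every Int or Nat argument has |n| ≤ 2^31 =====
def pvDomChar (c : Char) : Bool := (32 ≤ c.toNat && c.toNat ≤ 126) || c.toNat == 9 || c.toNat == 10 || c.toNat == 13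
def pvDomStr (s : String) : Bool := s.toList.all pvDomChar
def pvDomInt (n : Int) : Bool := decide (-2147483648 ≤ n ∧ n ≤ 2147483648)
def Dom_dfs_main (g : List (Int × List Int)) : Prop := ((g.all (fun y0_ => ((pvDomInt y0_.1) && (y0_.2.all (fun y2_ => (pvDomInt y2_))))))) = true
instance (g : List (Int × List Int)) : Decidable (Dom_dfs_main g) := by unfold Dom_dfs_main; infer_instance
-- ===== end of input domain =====

-- B replaces A's recursive nested-function DFS by an iterative traversal over an explicit
-- stack of adjacency suffixes (objective: alternative decomposition; same visited set).

-- `g.get(u)`: `none` (missing key) is mapped to [] — only reachable behind Pre_: on a dict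
-- with an edge to a non-key node both Pythons raise TypeError there (A iterates None, B
-- calls list(None)), so Pre_ excludes exactly those inputs.
def pvAdj (d : PySem.Dict Int (List Int)) (u : Int) : List Int :=
  (PySem.Dict.get? d u).getD []

-- ===== PORT A =====
-- `for v in g.get(u): if v not in visited: visited.add(v); dfs(v)`, with the recursion on a
-- `dfs` handed in as `f` so that the fuel below can bound the nesting depth structurally.
def pvGoList (f : Int → List Int → List Int) : List Int → List Int → List Int
  | [], vis => vis
  | v :: rest, vis =>
    if PySem.Set.contains vis v then pvGoList f rest vis
    else pvGoList f rest (f v (PySem.Set.add vis v))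

-- A's dfs(u); the fuel bounds the recursion depth: every nested call first adds a fresh
-- destination to `visited`, so `#destinations + 1` fuel is never exhausted (proved via the
-- equivalence with B's fuel-free behaviour below).
def pvDfsA (d : PySem.Dict Int (List Int)) : Nat → Int → List Int → List Int
  | 0 => fun _ vis => vis
  | m + 1 => fun u vis => pvGoList (pvDfsA d m) (pvAdj d u) vis

def dfs_main (g : List (Int × List Int)) : List Int :=
  let d := PySem.Dict.ofList g
  let fuel := (PySem.Dict.values d).flatten.length + 1
  (PySem.Dict.keys d).foldl
    (fun vis v => if PySem.Set.contains vis v then vis else pvDfsA d fuel v vis)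
    PySem.Set.empty

-- ===== PORT B =====
-- B's `while stack:` loop; the Lean list head is the Python stack top.  The fuel bounds the
-- number of loop iterations (each iteration either pops a frame, consumes one element of the
-- top frame, or marks a fresh destination visited, so the bound in dfs_main_alt suffices;
-- proved by pvLoopB_eq_W below).
def pvLoopB (d : PySem.Dict Int (List Int)) : Nat → List (List Int) → List Int → List Int
  | 0, _, vis => vis
  | _ + 1, [], vis => vis
  | f + 1, [] :: st', vis => pvLoopB d f st' vis
  | f + 1, (v :: rest) :: st', vis =>
    if PySem.Set.contains vis v then pvLoopB d f (rest :: st') vis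
    else pvLoopB d f (pvAdj d v :: rest :: st') (PySem.Set.add vis v)

def dfs_main_alt (g : List (Int × List Int)) : List Int :=
  let d := PySem.Dict.ofList g
  let ad := (PySem.Dict.values d).flatten.length
  let fuel := ad * (ad + 2) + ad + 2
  (PySem.Dict.keys d).foldl
    (fun vis s => if PySem.Set.contains vis s then vis else pvLoopB d fuel [pvAdj d s] vis)
    PySem.Set.empty

-- ===== PRECONDITION & SPEC =====
-- Pre_ excludes exactly the dicts with an edge pointing to a non-key node: there Python A
-- raises TypeError (iterating g.get(v) = None; B raises TypeError at the same inputs), so A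
-- returns no value.
def Pre_dfs_main (g : List (Int × List Int)) : Prop :=
  ∀ p ∈ (PySem.Dict.ofList g).items, ∀ v ∈ p.2, (PySem.Dict.ofList g).contains v = true
instance (g : List (Int × List Int)) : Decidable (Pre_dfs_main g) := by
  unfold Pre_dfs_main; infer_instance

def pvWitness_dfs_main : (List (Int × List Int)) := [(0, [1, 2]), (1, [2]), (2, [])]

def Spec_dfs_main (g : List (Int × List Int)) (out : List Int) : Prop := out = dfs_main_alt g
instance (g : List (Int × List Int)) (out : List Int) : Decidable (Spec_dfs_main g out) := by
  unfold Spec_dfs_main; infer_instance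

-- ===== CLAIM (what is proved, stated in full; the proofs are below) =====
def Claim_equal_dfs_main : Prop := ∀ (g : List (Int × List Int)), Dom_dfs_main g → Pre_dfs_main g → Spec_dfs_main g (dfs_main g)

-- ===== LEMMAS AND PROOFS =====

theorem pvAdj_subset (d : PySem.Dict Int (List Int)) (u : Int) :
    ∀ x ∈ pvAdj d u, x ∈ (PySem.Dict.values d).flatten := by
  intro x hx
  unfold pvAdj at hx
  cases h : PySem.Dict.get? d u with
  | none => rw [h] at hx; simp at hx
  | some l =>
    rw [h] at hx
    simp only [Option.getD_some] at hx
    have hitem := PySem.Dict.mem_items_of_get?_eq_some d h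
    have hlv : l ∈ PySem.Dict.values d := by
      simp only [PySem.Dict.values]
      exact List.mem_map.2 ⟨(u, l), hitem, rfl⟩
    exact List.mem_flatten.2 ⟨l, hlv, hx⟩

theorem pvAdj_len (d : PySem.Dict Int (List Int)) (u : Int) :
    (pvAdj d u).length ≤ (PySem.Dict.values d).flatten.length := by
  unfold pvAdj
  cases h : PySem.Dict.get? d u with
  | none => simp
  | some l =>
    simp only [Option.getD_some]
    have hitem := PySem.Dict.mem_items_of_get?_eq_some d h
    have hlv : l ∈ PySem.Dict.values d := by
      simp only [PySem.Dict.values]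
      exact List.mem_map.2 ⟨(u, l), hitem, rfl⟩
    exact (List.sublist_flatten_of_mem hlv).length_le

theorem pvCardStep {U U' vis : Finset Int} {v : Int}
    (hsub : U' ⊆ U) (hvU : v ∈ U) (hvvis : v ∉ vis) :
    (U' \ insert v vis).card < (U \ vis).card := by
  have h1 : U' \ insert v vis ⊆ (U \ vis).erase v := by
    intro x hx
    rcases Finset.mem_sdiff.1 hx with ⟨hxU', hxv⟩
    simp only [Finset.mem_insert, not_or] at hxv
    exact Finset.mem_erase.2 ⟨hxv.1, Finset.mem_sdiff.2 ⟨hsub hxU', hxv.2⟩⟩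
  calc (U' \ insert v vis).card ≤ ((U \ vis).erase v).card := Finset.card_le_card h1
    _ < (U \ vis).card := Finset.card_erase_lt_of_mem (Finset.mem_sdiff.2 ⟨hvU, hvvis⟩)

-- the loop measure of B's stack machine
def pvM (d : PySem.Dict Int (List Int)) (st : List (List Int)) (vis : List Int) : Nat :=
  ((st.flatten ++ (PySem.Dict.values d).flatten).toFinset \ vis.toFinset).card *
      ((PySem.Dict.values d).flatten.length + 2) +
    st.flatten.length + st.length

theorem pvDec1 (d : PySem.Dict Int (List Int)) (vis : List Int) (st' : List (List Int)) :
    pvM d st' vis < pvM d ([] :: st') vis := by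
  unfold pvM
  have hF : ([] :: st').flatten = st'.flatten := by simp
  rw [hF]
  have hL : ([] :: st').length = st'.length + 1 := by simp
  omega

theorem pvDec2 (d : PySem.Dict Int (List Int)) (vis : List Int) (v : Int) (rest : List Int) (st' : List (List Int)) :
    pvM d (rest :: st') vis < pvM d ((v :: rest) :: st') vis := by
  unfold pvM
  have hmono : (((rest :: st').flatten ++ (PySem.Dict.values d).flatten).toFinset \ vis.toFinset).card ≤
      ((((v :: rest) :: st').flatten ++ (PySem.Dict.values d).flatten).toFinset \ vis.toFinset).card := by
    apply Finset.card_le_card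
    apply Finset.sdiff_subset_sdiff _ (Finset.Subset.refl _)
    intro x hx
    simp only [List.mem_toFinset, List.flatten_cons, List.mem_append, List.mem_cons] at hx ⊢
    tauto
  have hW := mul_le_mul_right' hmono ((PySem.Dict.values d).flatten.length + 2)
  have hF : (rest :: st').flatten.length + 1 = ((v :: rest) :: st').flatten.length := by simp
  have hL : (rest :: st').length = ((v :: rest) :: st').length := by simp
  omega

theorem pvDec3 (d : PySem.Dict Int (List Int)) (vis : List Int) (v : Int) (rest : List Int) (st' : List (List Int))
    (hnm : ¬PySem.Set.contains vis v = true) :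
    pvM d (pvAdj d v :: rest :: st') (PySem.Set.add vis v) < pvM d ((v :: rest) :: st') vis := by
  unfold pvM
  have hv : v ∉ vis := fun hm => hnm (by simp [hm])
  have hadd : List.toFinset (PySem.Set.add vis v) = insert v vis.toFinset := by
    rw [PySem.Set.add_of_not_mem hv]; ext x; simp
  rw [hadd]
  have hcard : (((pvAdj d v :: rest :: st').flatten ++ (PySem.Dict.values d).flatten).toFinset \ insert v vis.toFinset).card <
      ((((v :: rest) :: st').flatten ++ (PySem.Dict.values d).flatten).toFinset \ vis.toFinset).card := by
    apply pvCardStep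
    · intro x hx
      simp only [List.mem_toFinset, List.flatten_cons, List.mem_append, List.mem_cons] at hx ⊢
      by_cases hxa : x ∈ pvAdj d v
      · exact Or.inr (pvAdj_subset d v x hxa)
      · tauto
    · simp
    · simpa using hv
  have hW := mul_le_mul_right' (Nat.succ_le_of_lt hcard) ((PySem.Dict.values d).flatten.length + 2)
  rw [Nat.succ_mul] at hW
  have hlen := pvAdj_len d v
  have hF : (pvAdj d v :: rest :: st').flatten.length = (pvAdj d v).length + (rest.length + st'.flatten.length) := by
    simp [List.flatten_cons]
  have hF' : ((v :: rest) :: st').flatten.length = 1 + (rest.length + st'.flatten.length) := by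
    simp [List.flatten_cons]; omega
  have hL : (pvAdj d v :: rest :: st').length = st'.length + 2 := by simp
  have hL' : ((v :: rest) :: st').length = st'.length + 1 := by simp
  omega

-- B's loop, fuel-free (well-founded on pvM); pvLoopB with sufficient fuel computes this
def pvLoopW (d : PySem.Dict Int (List Int)) (st : List (List Int)) (vis : List Int) : List Int :=
  match st with
  | [] => vis
  | [] :: st' => pvLoopW d st' vis
  | (v :: rest) :: st' =>
    if PySem.Set.contains vis v then pvLoopW d (rest :: st') vis
    else pvLoopW d (pvAdj d v :: rest :: st') (PySem.Set.add vis v)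
termination_by pvM d st vis
decreasing_by
  · exact pvDec1 d vis st'
  · exact pvDec2 d vis v rest st'
  · rename_i hnm
    exact pvDec3 d vis v rest st' hnm

theorem pvLoopB_eq_W (d : PySem.Dict Int (List Int)) :
    ∀ (f : Nat) (st : List (List Int)) (vis : List Int),
      pvM d st vis < f → pvLoopB d f st vis = pvLoopW d st vis := by
  intro f
  induction f with
  | zero => intro st vis h; omega
  | succ f ih =>
    intro st vis h
    match st with
    | [] => rw [pvLoopB, pvLoopW]
    | [] :: st' =>
      rw [pvLoopB, pvLoopW]
      exact ih st' vis (by have := pvDec1 d vis st'; omega)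
    | (v :: rest) :: st' =>
      by_cases hc : PySem.Set.contains vis v = true
      · rw [pvLoopB, if_pos hc, pvLoopW, if_pos hc]
        exact ih (rest :: st') vis (by have := pvDec2 d vis v rest st'; omega)
      · rw [pvLoopB, if_neg hc, pvLoopW, if_neg hc]
        exact ih (pvAdj d v :: rest :: st') (PySem.Set.add vis v)
          (by have := pvDec3 d vis v rest st' hc; omega)

theorem pvM_start_lt (d : PySem.Dict Int (List Int)) (s : Int) (vis : List Int) :
    pvM d [pvAdj d s] vis <
      (PySem.Dict.values d).flatten.length * ((PySem.Dict.values d).flatten.length + 2) +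
        (PySem.Dict.values d).flatten.length + 2 := by
  unfold pvM
  have h1 : (([pvAdj d s].flatten ++ (PySem.Dict.values d).flatten).toFinset \ vis.toFinset).card ≤
      (PySem.Dict.values d).flatten.length := by
    calc (([pvAdj d s].flatten ++ (PySem.Dict.values d).flatten).toFinset \ vis.toFinset).card
        ≤ (([pvAdj d s].flatten ++ (PySem.Dict.values d).flatten).toFinset).card :=
          Finset.card_le_card (Finset.sdiff_subset)
      _ ≤ ((PySem.Dict.values d).flatten.toFinset).card := by
          apply Finset.card_le_card
          intro x hx
          simp only [List.mem_toFinset, List.mem_append, List.flatten_cons, List.flatten_nil,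
            List.append_nil] at hx ⊢
          rcases hx with h | h
          · exact pvAdj_subset d s x h
          · exact h
      _ ≤ (PySem.Dict.values d).flatten.length := List.toFinset_card_le _
  have h2 : [pvAdj d s].flatten.length ≤ (PySem.Dict.values d).flatten.length := by
    simpa using pvAdj_len d s
  have hW := mul_le_mul_right' h1 ((PySem.Dict.values d).flatten.length + 2)
  have hL : ([pvAdj d s] : List (List Int)).length = 1 := by simp
  omega

-- pvGoList/pvDfsA only ever append to `visited`
theorem pvGoA_prefix (d : PySem.Dict Int (List Int)) :
    ∀ (n : Nat) (l : List Int) (vis : List Int),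
      ∃ ext, pvGoList (pvDfsA d n) l vis = vis ++ ext := by
  intro n
  induction n with
  | zero =>
    intro l
    induction l with
    | nil => exact fun vis => ⟨[], by rw [pvGoList, List.append_nil]⟩
    | cons v rest ih =>
      intro vis
      by_cases hc : PySem.Set.contains vis v = true
      · obtain ⟨e, he⟩ := ih vis
        exact ⟨e, by rw [pvGoList, if_pos hc, he]⟩
      · have hv : v ∉ vis := fun hm => hc (by simp [hm])
        obtain ⟨e, he⟩ := ih (PySem.Set.add vis v)
        refine ⟨v :: e, ?_⟩
        rw [pvGoList, if_neg hc]
        rw [show pvDfsA d 0 v (PySem.Set.add vis v) = PySem.Set.add vis v from rfl]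
        rw [he, PySem.Set.add_of_not_mem hv]
        simp
  | succ m ihm =>
    intro l
    induction l with
    | nil => exact fun vis => ⟨[], by rw [pvGoList, List.append_nil]⟩
    | cons v rest ih =>
      intro vis
      by_cases hc : PySem.Set.contains vis v = true
      · obtain ⟨e, he⟩ := ih vis
        exact ⟨e, by rw [pvGoList, if_pos hc, he]⟩
      · have hv : v ∉ vis := fun hm => hc (by simp [hm])
        obtain ⟨e2, he2⟩ := ih (pvDfsA d (m + 1) v (PySem.Set.add vis v))
        obtain ⟨e1, he1⟩ := ihm (pvAdj d v) (PySem.Set.add vis v)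
        refine ⟨v :: (e1 ++ e2), ?_⟩
        rw [pvGoList, if_neg hc, he2]
        rw [show pvDfsA d (m + 1) v (PySem.Set.add vis v)
              = pvGoList (pvDfsA d m) (pvAdj d v) (PySem.Set.add vis v) from rfl]
        rw [he1, PySem.Set.add_of_not_mem hv]
        simp

-- the number of still-unvisited destinations, the fuel measure of A's recursion
def pvUnv (d : PySem.Dict Int (List Int)) (vis : List Int) : Nat :=
  ((PySem.Dict.values d).flatten.toFinset \ vis.toFinset).card

theorem pvUnv_prefix (d : PySem.Dict Int (List Int)) (vis ext : List Int) :
    pvUnv d (vis ++ ext) ≤ pvUnv d vis := by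
  apply Finset.card_le_card
  apply Finset.sdiff_subset_sdiff (Finset.Subset.refl _)
  intro x hx
  simp only [List.mem_toFinset, List.mem_append] at hx ⊢
  exact Or.inl hx

theorem pvUnv_add_lt (d : PySem.Dict Int (List Int)) {vis : List Int} {v : Int}
    (hv : v ∉ vis) (hvAD : v ∈ (PySem.Dict.values d).flatten) :
    pvUnv d (PySem.Set.add vis v) < pvUnv d vis := by
  unfold pvUnv
  rw [PySem.Set.add_of_not_mem hv]
  have hadd : (vis ++ [v]).toFinset = insert v vis.toFinset := by
    ext x; simp
  rw [hadd]
  exact pvCardStep (Finset.Subset.refl _) (by simpa using hvAD) (by simpa using hv)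

-- B's stack machine simulates A's recursion frame by frame (fuel ≥ #unvisited destinations)
theorem pvSim (d : PySem.Dict Int (List Int)) :
    ∀ (n : Nat) (l : List Int) (st : List (List Int)) (vis : List Int),
      (∀ x ∈ l, x ∈ (PySem.Dict.values d).flatten) →
      pvUnv d vis ≤ n →
      pvLoopW d (l :: st) vis = pvLoopW d st (pvGoList (pvDfsA d n) l vis) := by
  intro n
  induction n using Nat.strong_induction_on with
  | _ n IH =>
    intro l
    induction l with
    | nil =>
      intro st vis _ _
      rw [pvGoList, pvLoopW]
    | cons v rest ih =>
      intro st vis hsub hn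
      by_cases hc : PySem.Set.contains vis v = true
      · rw [pvLoopW, if_pos hc, pvGoList, if_pos hc]
        exact ih st vis (fun x hx => hsub x (List.mem_cons_of_mem _ hx)) hn
      · have hv : v ∉ vis := fun hm => hc (by simp [hm])
        have hvAD : v ∈ (PySem.Dict.values d).flatten := hsub v (by simp)
        have hdrop := pvUnv_add_lt d hv hvAD
        cases n with
        | zero => omega
        | succ m =>
          have hun : pvUnv d (pvGoList (pvDfsA d m) (pvAdj d v) (PySem.Set.add vis v)) ≤ m + 1 := by
            obtain ⟨e, he⟩ := pvGoA_prefix d m (pvAdj d v) (PySem.Set.add vis v)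
            rw [he]
            have := pvUnv_prefix d (PySem.Set.add vis v) e
            omega
          rw [pvLoopW, if_neg hc,
            IH m (Nat.lt_succ_self m) (pvAdj d v) (rest :: st) (PySem.Set.add vis v)
              (pvAdj_subset d v) (by omega),
            ih st (pvGoList (pvDfsA d m) (pvAdj d v) (PySem.Set.add vis v))
              (fun x hx => hsub x (List.mem_cons_of_mem _ hx)) hun]
          rw [pvGoList, if_neg hc]
          rw [show pvDfsA d (m + 1) v (PySem.Set.add vis v)
                = pvGoList (pvDfsA d m) (pvAdj d v) (PySem.Set.add vis v) from rfl]

theorem pvFold (d : PySem.Dict Int (List Int)) (ks : List Int) :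
    ∀ (vis : List Int),
      ks.foldl (fun vis v => if PySem.Set.contains vis v then vis
          else pvDfsA d ((PySem.Dict.values d).flatten.length + 1) v vis) vis
        = ks.foldl (fun vis s => if PySem.Set.contains vis s then vis
          else pvLoopB d ((PySem.Dict.values d).flatten.length * ((PySem.Dict.values d).flatten.length + 2) +
            (PySem.Dict.values d).flatten.length + 2) [pvAdj d s] vis) vis := by
  induction ks with
  | nil => intro vis; rfl
  | cons k ks ih =>
    intro vis
    rw [List.foldl_cons, List.foldl_cons]
    have hstep : (if PySem.Set.contains vis k then vis
          else pvDfsA d ((PySem.Dict.values d).flatten.length + 1) k vis)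
        = (if PySem.Set.contains vis k then vis
          else pvLoopB d ((PySem.Dict.values d).flatten.length * ((PySem.Dict.values d).flatten.length + 2) +
            (PySem.Dict.values d).flatten.length + 2) [pvAdj d k] vis) := by
      by_cases hc : PySem.Set.contains vis k = true
      · rw [if_pos hc, if_pos hc]
      · rw [if_neg hc, if_neg hc]
        have hun : pvUnv d vis ≤ (PySem.Dict.values d).flatten.length := by
          unfold pvUnv
          calc (((PySem.Dict.values d).flatten.toFinset) \ vis.toFinset).card
              ≤ ((PySem.Dict.values d).flatten.toFinset).card :=
                Finset.card_le_card (Finset.sdiff_subset)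
            _ ≤ (PySem.Dict.values d).flatten.length := List.toFinset_card_le _
        rw [pvLoopB_eq_W d _ _ _ (pvM_start_lt d k vis),
          pvSim d ((PySem.Dict.values d).flatten.length) (pvAdj d k) [] vis (pvAdj_subset d k) hun,
          pvLoopW]
        rfl
    rw [hstep, ih]

theorem dfs_main_eq_alt (g : List (Int × List Int)) : dfs_main g = dfs_main_alt g := by
  unfold dfs_main dfs_main_alt
  exact pvFold (PySem.Dict.ofList g) (PySem.Dict.keys (PySem.Dict.ofList g)) PySem.Set.empty

-- ===== VERDICT (by name: the statement is the Claim_ definition above) =====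
theorem dfs_main_spec : Claim_equal_dfs_main := by
  intro g _ _
  exact dfs_main_eq_alt g
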